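-- pv_equiv track=rewrite | github.com/sunbyte16/100-Day-Coding-Sprint | Day-23/Alien Toys.py | rearrange_blocks_to_form_name
-- ===== SOURCE A (Python) =====
-- def rearrange_blocks_to_form_name(S, P):
--     from collections import Counter
--
--     n, m = len(S), len(P)
--     if m > n:
--         return 0, []
--
--     p_count = Counter(P)
--     window = Counter(S[:m])
--
--     result = []
--
--     if window == p_count:
--         result.append(1)
--
--     for i in range(m, n):
--         window[S[i]] += 1
--         window[S[i - m]] -= 1
--
--         if window[S[i - m]] == 0:
--             del window[S[i - m]]
--
--         if window == p_count:
--             result.append(i - m + 2)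
--
--     return len(result), result
-- ===== SOURCE B (Python) =====
-- def rearrange_blocks_to_form_name(S, P):
--     n, m = len(S), len(P)
--     if m > n:
--         return 0, []
--     key = sorted(P)
--     result = [i + 1 for i in range(n - m + 1) if sorted(S[i:i + m]) == key]
--     return len(result), result
-- ===== Notes on version B (the rewrite author's own statement) =====
-- stated objective: simpler
-- what changed: A slides a Counter over S with incremental add/remove/delete and per-step dict comparison; B recomputes each window from scratch and compares its sorted characters against sorted(P) in one comprehension.
import Mathlib
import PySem

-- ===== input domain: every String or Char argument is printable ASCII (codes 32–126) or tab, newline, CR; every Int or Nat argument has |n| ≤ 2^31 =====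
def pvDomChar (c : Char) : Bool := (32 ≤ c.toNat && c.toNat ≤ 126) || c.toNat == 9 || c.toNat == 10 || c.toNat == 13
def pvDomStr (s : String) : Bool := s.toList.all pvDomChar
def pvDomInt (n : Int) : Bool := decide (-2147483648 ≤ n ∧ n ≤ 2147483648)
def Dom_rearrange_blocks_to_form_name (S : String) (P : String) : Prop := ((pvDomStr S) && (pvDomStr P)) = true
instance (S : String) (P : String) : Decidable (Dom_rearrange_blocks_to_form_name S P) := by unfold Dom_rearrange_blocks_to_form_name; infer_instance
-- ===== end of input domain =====

-- B replaces A's incrementally maintained sliding Counter (with a per-step dict comparison) by a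
-- plain comprehension comparing each window's sorted characters with sorted(P): simpler, not faster.

-- ===== PORT A =====
-- Python's `==` on dicts, order-insensitive (neither operand ever stores a zero count at a
-- comparison point in A, so dict equality coincides with Counter equality here).
def pyDictEq (d1 d2 : PySem.Dict Char Int) : Bool :=
  PySem.Set.equal d1.keys d2.keys && d1.keys.all (fun k => d1.get? k == d2.get? k)

-- the loop body of A (indices i and i-m are always in range, so `.getD default` never fires)
def pvStepA (s : List Char) (m : Nat) (p_count : PySem.Dict Char Int)
    (st : PySem.Dict Char Int × List Int) (i : Int) : PySem.Dict Char Int × List Int :=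
  let w := st.1.modify ((PySem.List.pyGet? s i).getD default) 0 (· + 1)
  let d := (PySem.List.pyGet? s (i - (m : Int))).getD default
  let w := w.modify d 0 (· - 1)
  let w := if w.getD d 0 == 0 then w.erase d else w
  (w, if pyDictEq w p_count then st.2 ++ [i - (m : Int) + 2] else st.2)

def rearrange_blocks_to_form_name (S : String) (P : String) : Int × List Int :=
  let s := S.toList
  let p := P.toList
  let n := s.length
  let m := p.length
  if m > n then (0, [])
  else
    let p_count := PySem.Dict.counter p
    let window := PySem.Dict.counter (PySem.List.slice s none (some (m : Int)))
    let result : List Int := if pyDictEq window p_count then [1] else []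
    let st := (PySem.List.pyRange (m : Int) (n : Int)).foldl (pvStepA s m p_count) (window, result)
    ((st.2.length : Int), st.2)

-- ===== PORT B =====
def rearrange_blocks_to_form_name_alt (S : String) (P : String) : Int × List Int :=
  let s := S.toList
  let p := P.toList
  let n := s.length
  let m := p.length
  if m > n then (0, [])
  else
    let key := PySem.List.sorted p id
    let result := ((PySem.List.pyRange 0 ((n : Int) - (m : Int) + 1)).filter
        (fun i => PySem.List.sorted (PySem.List.slice s (some i) (some (i + (m : Int)))) id == key)).map
        (fun i => i + 1)
    ((result.length : Int), result)

-- ===== PRECONDITION & SPEC =====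
def Spec_rearrange_blocks_to_form_name (S : String) (P : String) (out : Int × List Int) : Prop := out = rearrange_blocks_to_form_name_alt S P
instance (S : String) (P : String) (out : Int × List Int) : Decidable (Spec_rearrange_blocks_to_form_name S P out) := by unfold Spec_rearrange_blocks_to_form_name; infer_instance

-- ===== CLAIM (what is proved, stated in full; the proofs are below) =====
def Claim_equal_rearrange_blocks_to_form_name : Prop := ∀ (S : String) (P : String), Dom_rearrange_blocks_to_form_name S P → Spec_rearrange_blocks_to_form_name S P (rearrange_blocks_to_form_name S P)

-- ===== LEMMAS AND PROOFS =====

-- the window of length |P| starting at j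
def pvWin (s p : List Char) (j : Nat) : List Char := (s.drop j).take p.length

-- B's filter predicate
def pvCond (s p : List Char) (i : Int) : Bool :=
  PySem.List.sorted (PySem.List.slice s (some i) (some (i + (p.length : Int)))) id == PySem.List.sorted p id

-- invariant carried by A's window dict: values are the window's character counts,
-- keys are unique, and no key is stored with a zero value
def pvInv (s p : List Char) (w : PySem.Dict Char Int) (j : Nat) : Prop :=
  (∀ c, w.getD c 0 = ((pvWin s p j).count c : Int)) ∧ w.keys.Nodup ∧
  (∀ c, w.contains c = true → w.getD c 0 ≠ 0)

theorem pvGet?_erase {κ ν : Type} [BEq κ] [LawfulBEq κ] [DecidableEq κ] (d : PySem.Dict κ ν) (k k' : κ) :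
    (d.erase k).get? k' = if k' = k then none else d.get? k' := by
  rcases d with ⟨l⟩
  induction l with
  | nil => simp [PySem.Dict.erase, PySem.Dict.get?]
  | cons a l ih =>
    by_cases h1 : a.1 = k <;> by_cases h2 : a.1 = k' <;>
      simp_all [PySem.Dict.erase, PySem.Dict.get?]

theorem pvKeys_erase {κ ν : Type} [BEq κ] (d : PySem.Dict κ ν) (k : κ) :
    (d.erase k).keys = d.keys.filter (fun x => !(x == k)) := by
  rcases d with ⟨l⟩
  simp [PySem.Dict.erase, PySem.Dict.keys, List.filter_map]
  rfl

theorem pvGetD_counter (p : List Char) (c : Char) :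
    (PySem.Dict.counter p).getD c 0 = (p.count c : Int) := by
  rw [PySem.Dict.counter_eq_foldl]
  simpa using PySem.Dict.getD_foldl_modify_add_one p PySem.Dict.empty c

theorem pvSorted_eq_iff_perm (xs ys : List Char) :
    (PySem.List.sorted xs id == PySem.List.sorted ys id) = true ↔ xs.Perm ys := by
  rw [beq_iff_eq]
  constructor
  · intro h
    exact ((PySem.List.sorted_perm xs id false).symm.trans (h ▸ PySem.List.sorted_perm ys id false))
  · intro h
    have hp : (PySem.List.sorted xs id).Perm (PySem.List.sorted ys id) :=
      (PySem.List.sorted_perm xs id false).trans (h.trans (PySem.List.sorted_perm ys id false).symm)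
    exact hp.eq_of_pairwise (fun a b _ _ h1 h2 => le_antisymm h1 h2)
      (by simpa using PySem.List.sorted_pairwise xs (id : Char → Char))
      (by simpa using PySem.List.sorted_pairwise ys (id : Char → Char))

theorem pvCond_iff (s p : List Char) (j : Nat) :
    pvCond s p (j : Int) = true ↔ ∀ c, (pvWin s p j).count c = p.count c := by
  have hs : PySem.List.slice s (some (j : Int)) (some ((j : Int) + (p.length : Int))) = pvWin s p j := by
    have : ((j : Int) + (p.length : Int)) = ((j + p.length : Nat) : Int) := by push_cast; ring
    rw [this, PySem.List.slice_natCast]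
    simp [pvWin]
  rw [pvCond, hs, pvSorted_eq_iff_perm]
  exact List.perm_iff_count.trans (by simp)

theorem pvGet?_of_contains (d : PySem.Dict Char Int) (c : Char) (h : d.contains c = true) :
    d.get? c = some (d.getD c 0) := by
  rw [PySem.Dict.contains_eq_isSome_get?] at h
  rcases ho : d.get? c with _ | v
  · rw [ho] at h; simp at h
  · rw [PySem.Dict.getD_eq_get?_getD, ho]; rfl

theorem pvDictEq_iff (w v : PySem.Dict Char Int)
    (hw : ∀ c, w.contains c = true → w.getD c 0 ≠ 0)
    (hv : ∀ c, v.contains c = true → v.getD c 0 ≠ 0) :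
    pyDictEq w v = true ↔ ∀ c, w.getD c 0 = v.getD c 0 := by
  have hmemw : ∀ c, c ∈ w.keys ↔ w.getD c 0 ≠ 0 := by
    intro c
    constructor
    · intro h; exact hw c ((PySem.Dict.contains_iff_mem_keys w c).mpr h)
    · intro h
      by_contra hnc
      have : w.contains c = false := by
        rcases hb : w.contains c with _ | _
        · rfl
        · exact absurd ((PySem.Dict.contains_iff_mem_keys w c).mp hb) hnc
      exact h (PySem.Dict.getD_of_not_contains w 0 this)
  have hmemv : ∀ c, c ∈ v.keys ↔ v.getD c 0 ≠ 0 := by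
    intro c
    constructor
    · intro h; exact hv c ((PySem.Dict.contains_iff_mem_keys v c).mpr h)
    · intro h
      by_contra hnc
      have : v.contains c = false := by
        rcases hb : v.contains c with _ | _
        · rfl
        · exact absurd ((PySem.Dict.contains_iff_mem_keys v c).mp hb) hnc
      exact h (PySem.Dict.getD_of_not_contains v 0 this)
  constructor
  · intro h c
    rw [pyDictEq, Bool.and_eq_true, PySem.Set.equal_iff, List.all_eq_true] at h
    by_cases hc : c ∈ w.keys
    · have := h.2 c hc
      rw [beq_iff_eq] at this
      rw [PySem.Dict.getD_eq_get?_getD, PySem.Dict.getD_eq_get?_getD, this]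
    · have h1 : w.getD c 0 = 0 := by by_contra hx; exact hc ((hmemw c).mpr hx)
      have h2 : v.getD c 0 = 0 := by
        by_contra hx
        exact hc ((h.1 c).mpr ((hmemv c).mpr hx))
      rw [h1, h2]
  · intro h
    rw [pyDictEq, Bool.and_eq_true, PySem.Set.equal_iff, List.all_eq_true]
    constructor
    · intro c; rw [hmemw c, hmemv c, h c]
    · intro c hc
      have hcw : w.contains c = true := (PySem.Dict.contains_iff_mem_keys w c).mpr hc
      have hcv : v.contains c = true := by
        rw [PySem.Dict.contains_iff_mem_keys]
        exact (hmemv c).mpr ((h c) ▸ (hmemw c).mp hc)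
      rw [pvGet?_of_contains w c hcw, pvGet?_of_contains v c hcv, h c]
      simp

theorem pvCounter_no_zero (p : List Char) :
    ∀ c, (PySem.Dict.counter p).contains c = true → (PySem.Dict.counter p).getD c 0 ≠ 0 := by
  intro c h
  rw [PySem.Dict.contains_counter] at h
  rw [pvGetD_counter]
  have : 0 < p.count c := List.count_pos_iff.mpr (by simpa using h)
  omega

theorem pvEq_cond (s p : List Char) (w : PySem.Dict Char Int) (j : Nat)
    (hinv : pvInv s p w j) :
    pyDictEq w (PySem.Dict.counter p) = pvCond s p (j : Int) := by
  have h1 := pvDictEq_iff w (PySem.Dict.counter p) hinv.2.2 (pvCounter_no_zero p)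
  have h2 := pvCond_iff s p j
  have key : pyDictEq w (PySem.Dict.counter p) = true ↔ pvCond s p (j : Int) = true := by
    rw [h1, h2]
    constructor
    · intro hv c
      have := hv c
      rw [hinv.1 c, pvGetD_counter] at this
      exact_mod_cast this
    · intro hv c
      rw [hinv.1 c, pvGetD_counter, hv c]
  cases hq : pyDictEq w (PySem.Dict.counter p) <;> cases hb : pvCond s p (j : Int) <;> simp_all

theorem pvCount_step (s : List Char) (m j : Nat) (h : j + m < s.length) (c' : Char) :
    (((s.drop (j + 1)).take m).count c' : Int) =
      ((s.drop j).take m).count c' + (if c' = s[j + m] then 1 else 0)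
        - (if c' = s[j]'(by omega) then 1 else 0) := by
  have hdrop : s.drop j = s[j]'(by omega) :: s.drop (j + 1) := List.drop_eq_getElem_cons (by omega)
  cases m with
  | zero =>
    simp only [List.take_zero, List.count_nil, Nat.cast_zero]
    split_ifs <;> simp_all
  | succ k =>
    have h1 : (s.drop j).take (k + 1) = s[j]'(by omega) :: (s.drop (j + 1)).take k := by
      rw [hdrop, List.take_succ_cons]
    have h2 : (s.drop (j + 1)).take (k + 1) = (s.drop (j + 1)).take k ++ [s[j + (k + 1)]] := by
      rw [List.take_add_one]
      congr 1
      rw [List.getElem?_drop]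
      rw [List.getElem?_eq_getElem (by omega)]
      simp only [Option.toList_some]
      congr 2
      omega
    rw [h1, h2]
    simp only [List.count_append, List.count_cons, List.count_nil]
    split_ifs <;> simp_all

theorem pvStep_inv (s p : List Char) (w : PySem.Dict Char Int) (j : Nat)
    (hinv : pvInv s p w j) (h : j + p.length < s.length) (r : List Int) :
    pvInv s p (pvStepA s p.length (PySem.Dict.counter p) (w, r) ((p.length : Int) + (j : Int))).1 (j + 1) := by
  have hc0 : (PySem.List.pyGet? s ((p.length : Int) + (j : Int))).getD default = s[j + p.length] := by
    have : ((p.length : Int) + (j : Int)) = ((j + p.length : Nat) : Int) := by push_cast; ring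
    rw [this, PySem.List.pyGet?_natCast, List.getElem?_eq_getElem h]
    rfl
  have hd0 : (PySem.List.pyGet? s ((p.length : Int) + (j : Int) - (p.length : Int))).getD default
      = s[j]'(by omega) := by
    have : ((p.length : Int) + (j : Int) - (p.length : Int)) = ((j : Nat) : Int) := by ring
    rw [this, PySem.List.pyGet?_natCast, List.getElem?_eq_getElem (by omega)]
    rfl
  simp only [pvStepA, hc0, hd0]
  set c0 := s[j + p.length] with hc0d
  set d0 := s[j]'(by omega) with hd0d
  set w1 := w.modify c0 0 (· + 1) with hw1
  set w2 := w1.modify d0 0 (· - 1) with hw2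
  have hget1 : ∀ c', w1.getD c' 0 = if c' = c0 then w.getD c0 0 + 1 else w.getD c' 0 := by
    intro c'; rw [hw1, PySem.Dict.getD_modify]
  have hget2 : ∀ c', w2.getD c' 0 =
      w.getD c' 0 + (if c' = c0 then 1 else 0) - (if c' = d0 then 1 else 0) := by
    intro c'
    rw [hw2, PySem.Dict.getD_modify, hget1 d0, hget1 c']
    split_ifs <;> simp_all
  have hcount : ∀ c', w2.getD c' 0 = ((pvWin s p (j + 1)).count c' : Int) := by
    intro c'
    have hstep := pvCount_step s p.length j h c'
    rw [← hc0d, ← hd0d] at hstep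
    rw [hget2 c', hinv.1 c']
    simp only [pvWin] at *
    rw [hstep]
  have hzero3 : ∀ c', (if w2.getD d0 0 == 0 then w2.erase d0 else w2).getD c' 0 = w2.getD c' 0 := by
    intro c'
    split_ifs with hz
    · by_cases hcd : c' = d0
      · subst hcd
        rw [PySem.Dict.getD_eq_get?_getD, pvGet?_erase, if_pos rfl]
        rw [beq_iff_eq] at hz
        simp [hz]
      · rw [PySem.Dict.getD_eq_get?_getD, pvGet?_erase, if_neg hcd, ← PySem.Dict.getD_eq_get?_getD]
    · rfl
  have hn1 : w1.keys.Nodup := by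
    rw [hw1, PySem.Dict.keys_modify]; exact PySem.Dict.nodup_keys_insert _ _ _ hinv.2.1
  have hn2 : w2.keys.Nodup := by
    rw [hw2, PySem.Dict.keys_modify]; exact PySem.Dict.nodup_keys_insert _ _ _ hn1
  have hcontw : ∀ c', c' ≠ c0 → c' ≠ d0 → w2.contains c' = true → w.contains c' = true := by
    intro c' h1 h2 hc
    rw [hw2, PySem.Dict.contains_modify] at hc
    rcases Bool.or_eq_true_iff.mp hc with hc | hc
    · exact absurd (beq_iff_eq.mp hc) h2
    · rw [hw1, PySem.Dict.contains_modify] at hc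
      rcases Bool.or_eq_true_iff.mp hc with hc | hc
      · exact absurd (beq_iff_eq.mp hc) h1
      · exact hc
  refine ⟨fun c' => by rw [hzero3 c', hcount c'], ?_, ?_⟩
  · split_ifs with hz
    · rw [pvKeys_erase]; exact hn2.filter _
    · exact hn2
  · intro c' hcont
    rw [hzero3 c']
    by_cases hcd : c' = d0
    · subst hcd
      split_ifs at hcont with hz
      · rw [PySem.Dict.contains_eq_isSome_get?, pvGet?_erase, if_pos rfl] at hcont
        simp at hcont
      · simpa using hz
    · have hc2 : w2.contains c' = true := by
        split_ifs at hcont with hz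
        · rw [PySem.Dict.contains_eq_isSome_get?, pvGet?_erase, if_neg hcd,
            ← PySem.Dict.contains_eq_isSome_get?] at hcont
          exact hcont
        · exact hcont
      by_cases hcc : c' = c0
      · rw [hget2 c', if_pos hcc, if_neg hcd]
        have h0 : 0 ≤ w.getD c' 0 := by rw [hinv.1 c']; positivity
        omega
      · rw [hget2 c', if_neg hcc, if_neg hcd]
        have := hinv.2.2 c' (hcontw c' hcc hcd hc2)
        omega

theorem pvLoopA (s p : List Char) (t : Nat) (ht : p.length + t ≤ s.length) :
    pvInv s p ((PySem.List.pyRange (p.length : Int) ((p.length : Int) + (t : Int))).foldl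
        (pvStepA s p.length (PySem.Dict.counter p))
        (PySem.Dict.counter (PySem.List.slice s none (some (p.length : Int))),
         if pyDictEq (PySem.Dict.counter (PySem.List.slice s none (some (p.length : Int)))) (PySem.Dict.counter p) then [1] else [])).1 t ∧
    ((PySem.List.pyRange (p.length : Int) ((p.length : Int) + (t : Int))).foldl
        (pvStepA s p.length (PySem.Dict.counter p))
        (PySem.Dict.counter (PySem.List.slice s none (some (p.length : Int))),
         if pyDictEq (PySem.Dict.counter (PySem.List.slice s none (some (p.length : Int)))) (PySem.Dict.counter p) then [1] else [])).2
      = ((List.range (t + 1)).filter (fun j : Nat => pvCond s p (j : Int))).map (fun j : Nat => (j : Int) + 1) := by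
  induction t with
  | zero =>
    have hrange : PySem.List.pyRange (p.length : Int) ((p.length : Int) + ((0 : Nat) : Int)) = [] := by
      simp [PySem.List.pyRange]
    rw [hrange]
    simp only [List.foldl_nil]
    have hinv0 : pvInv s p (PySem.Dict.counter (PySem.List.slice s none (some (p.length : Int)))) 0 := by
      have hsl : PySem.List.slice s none (some (p.length : Int)) = pvWin s p 0 := by
        rw [PySem.List.slice_to s (by omega)]
        simp [pvWin]
      refine ⟨?_, ?_, ?_⟩
      · intro c; rw [hsl, pvGetD_counter]
      · exact PySem.Dict.nodup_keys_counter _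
      · exact fun c h => pvCounter_no_zero _ c h
    refine ⟨hinv0, ?_⟩
    have := pvEq_cond s p _ 0 hinv0
    simp only [this]
    cases hb : pvCond s p ((0 : Nat) : Int) <;> push_cast at hb <;> simp [hb, List.range_succ, List.filter]
  | succ t ih =>
    have hle : p.length + t ≤ s.length := by omega
    obtain ⟨hI, hR⟩ := ih hle
    have hsplit : PySem.List.pyRange (p.length : Int) ((p.length : Int) + ((t + 1 : Nat) : Int))
        = PySem.List.pyRange (p.length : Int) ((p.length : Int) + (t : Int)) ++ [(p.length : Int) + (t : Int)] := by
      have h1 : ((p.length : Int) + ((t + 1 : Nat) : Int)) = ((p.length : Int) + (t : Int)) + 1 := by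
        push_cast; ring
      rw [h1, PySem.List.pyRange_one_succ_right (by omega)]
    rw [hsplit, List.foldl_append, List.foldl_cons, List.foldl_nil]
    generalize hg : (PySem.List.pyRange (p.length : Int) ((p.length : Int) + (t : Int))).foldl
        (pvStepA s p.length (PySem.Dict.counter p))
        (PySem.Dict.counter (PySem.List.slice s none (some (p.length : Int))),
         if pyDictEq (PySem.Dict.counter (PySem.List.slice s none (some (p.length : Int)))) (PySem.Dict.counter p) then [1] else []) = st at hI hR ⊢
    have hstep := pvStep_inv s p st.1 t hI (by omega) st.2
    refine ⟨hstep, ?_⟩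
    have h2' : (pvStepA s p.length (PySem.Dict.counter p) (st.1, st.2) ((p.length : Int) + (t : Int))).2
        = if pyDictEq (pvStepA s p.length (PySem.Dict.counter p) (st.1, st.2) ((p.length : Int) + (t : Int))).1 (PySem.Dict.counter p)
            then st.2 ++ [(p.length : Int) + (t : Int) - (p.length : Int) + 2] else st.2 := rfl
    rw [h2', pvEq_cond s p _ (t + 1) hstep, hR]
    have hidx : ((p.length : Int) + (t : Int) - (p.length : Int) + 2) = (((t + 1 : Nat) : Int) + 1) := by
      push_cast; ring
    rw [hidx]
    conv_rhs => rw [List.range_succ, List.filter_append, List.map_append]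
    cases hb : pvCond s p (((t + 1 : Nat)) : Int) <;> push_cast at hb <;> simp [hb]

-- ===== VERDICT (by name: the statement is the Claim_ definition above) =====
theorem rearrange_blocks_to_form_name_spec : Claim_equal_rearrange_blocks_to_form_name := by
  intro S P _
  unfold Spec_rearrange_blocks_to_form_name
  unfold rearrange_blocks_to_form_name rearrange_blocks_to_form_name_alt
  set s := S.toList
  set p := P.toList
  by_cases hmn : p.length > s.length
  · simp [hmn]
  · have hmn' : p.length ≤ s.length := by omega
    simp only [if_neg (by omega : ¬ p.length > s.length)]
    have hn : ((s.length : Int)) = (p.length : Int) + ((s.length - p.length : Nat) : Int) := by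
      omega
    obtain ⟨hI, hR⟩ := pvLoopA s p (s.length - p.length) (by omega)
    have hb : ((s.length : Int) - (p.length : Int) + 1) = ((s.length - p.length + 1 : Nat) : Int) := by
      push_cast
      omega
    rw [hb, PySem.List.pyRange_zero_natCast, hn, hR]
    have hpred : (fun i : Int => PySem.List.sorted (PySem.List.slice s (some i) (some (i + (p.length : Int)))) id == PySem.List.sorted p id) = pvCond s p := rfl
    rw [hpred, List.filter_map, List.map_map]
    rfl
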